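-- pv_equiv track=rewrite | github.com/jmegner/CheckioPuzzles | magic-domino.py | collectionsOfDisjointGroups
-- ===== SOURCE A (Python) =====
-- def collectionsOfDisjointGroups(groups, numGroups, prevUsedDominos=set()):
--     if numGroups == 0:
--         yield []
--     else:
--         for firstGroupIdx, firstGroup in enumerate(groups):
--             usedDominos = prevUsedDominos | set(firstGroup)
--
--             groupsDisjointWithPrevGroups = [
--                 furtherGroup for furtherGroup in groups[firstGroupIdx + 1 :]
--                 if all(furtherElem not in usedDominos for furtherElem in furtherGroup)
--             ]
--
--             for disjointGroups in collectionsOfDisjointGroups(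
--                 groupsDisjointWithPrevGroups, numGroups - 1, usedDominos
--             ):
--                 yield [firstGroup] + disjointGroups
-- ===== SOURCE B (Python) =====
-- def collectionsOfDisjointGroups(groups, numGroups, prevUsedDominos=set()):
--     # Depth-first selection by index: extend(start, used, k) lists every way to
--     # pick k compatible groups from groups[start:], a group being compatible
--     # when none of its dominos has been used yet.
--     def extend(start, used, k):
--         if k == 0:
--             return [[]]
--         return [[groups[i]] + tail
--                 for i in range(start, len(groups))
--                 if not any(e in used for e in groups[i])
--                 for tail in extend(i + 1, used | set(groups[i]), k - 1)]
--     yield from extend(0, set(prevUsedDominos), numGroups)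
-- ===== Notes on version B (the rewrite author's own statement) =====
-- stated objective: faster
-- what changed: A is a generator that, at each recursion level, rebuilds a filtered candidate list (all remaining groups disjoint with everything used) and loops over enumerate of it; B is an index-based depth-first selection that never builds filtered lists: it ranges over positions from a start index, tests only the group being chosen against the accumulated used-set (seeded from prevUsedDominos), and assembles the collections eagerly by list comprehension; …
-- outside the precondition, e.g. on collectionsOfDisjointGroups([[1]], 1, {1}): A returns [[[1]]], B returns []
import Mathlib
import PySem

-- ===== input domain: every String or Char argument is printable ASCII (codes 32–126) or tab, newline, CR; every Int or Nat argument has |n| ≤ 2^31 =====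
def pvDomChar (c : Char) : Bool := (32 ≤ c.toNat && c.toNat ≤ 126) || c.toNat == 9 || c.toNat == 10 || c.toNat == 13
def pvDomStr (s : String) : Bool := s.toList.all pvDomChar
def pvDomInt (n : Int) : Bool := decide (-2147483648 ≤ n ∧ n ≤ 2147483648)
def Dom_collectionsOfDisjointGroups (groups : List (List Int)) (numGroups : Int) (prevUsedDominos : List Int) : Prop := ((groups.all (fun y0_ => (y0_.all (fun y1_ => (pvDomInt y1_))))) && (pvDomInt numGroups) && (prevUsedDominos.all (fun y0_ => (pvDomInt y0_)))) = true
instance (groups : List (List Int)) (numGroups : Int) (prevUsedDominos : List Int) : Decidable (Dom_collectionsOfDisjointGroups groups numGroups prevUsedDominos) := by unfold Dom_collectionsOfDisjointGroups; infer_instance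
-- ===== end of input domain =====

-- B replaces A's filter-and-recurse generator (which rebuilds a filtered candidate list at
-- every level) by an index-based depth-first selection that tests only the group being chosen
-- against the accumulated used-set; equivalence of the RETURN values on Pre_ is what is proved.

-- ===== PORT A =====
-- the comprehension's condition: all(furtherElem not in usedDominos for furtherElem in furtherGroup)
def disjA (usedDominos : PySem.Set Int) (furtherGroup : List Int) : Bool :=
  furtherGroup.all (fun e => !(PySem.Set.contains usedDominos e))

-- Literal port of A: the generator's for-loop over enumerate(groups) becomes structural
-- recursion (head = current firstGroup, tail = the remaining loop iterations = groups[idx+1:]).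
def collectionsOfDisjointGroups (groups : List (List Int)) (numGroups : Int) (prevUsedDominos : List Int) : List (List (List Int)) :=
  if numGroups = 0 then [[]]
  else
    match groups with
    | [] => []
    | firstGroup :: rest =>
      (collectionsOfDisjointGroups
          (rest.filter (disjA (PySem.Set.union prevUsedDominos (PySem.Set.ofList firstGroup))))
          (numGroups - 1)
          (PySem.Set.union prevUsedDominos (PySem.Set.ofList firstGroup))).map
          (fun disjointGroups => firstGroup :: disjointGroups)
        ++ collectionsOfDisjointGroups rest numGroups prevUsedDominos
termination_by groups.length
decreasing_by
  · simp
    exact List.length_filter_le _ _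
  · simp

-- ===== PORT B =====
-- extend(start, used, k) of Source B; the fuel parameter only makes the recursion visibly total
-- (every call from the wrapper has enough fuel: the recursion depth is bounded by the list length).
def pyExtend (groups : List (List Int)) (fuel : Nat) (start : Int) (used : PySem.Set Int) (k : Int) : List (List (List Int)) :=
  if k = 0 then [[]]
  else
    match fuel with
    | 0 => []
    | fuel' + 1 =>
      (PySem.List.pyRange start (groups.length : Int) 1).flatMap (fun i =>
        if (PySem.List.pyGetD groups i []).any (fun e => PySem.Set.contains used e) then []
        else
          (pyExtend groups fuel' (i + 1)
              (PySem.Set.union used (PySem.Set.ofList (PySem.List.pyGetD groups i []))) (k - 1)).map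
            (fun tail => PySem.List.pyGetD groups i [] :: tail))

def collectionsOfDisjointGroups_alt (groups : List (List Int)) (numGroups : Int) (prevUsedDominos : List Int) : List (List (List Int)) :=
  pyExtend groups (groups.length + 1) 0 (PySem.Set.ofList prevUsedDominos) numGroups

-- ===== PRECONDITION & SPEC =====
-- Pre_ excludes calls where prevUsedDominos — the recursion's private accumulator, empty in
-- intended use — shares a domino with a group that could start a selection: there the
-- unspecified question of whether previously-used dominos constrain the first chosen group of a
-- collection is answered differently by A (no) and B (yes), and either reading is defensible.
def Pre_collectionsOfDisjointGroups (groups : List (List Int)) (numGroups : Int) (prevUsedDominos : List Int) : Prop :=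
  ∀ tl ∈ groups.tails, 1 ≤ numGroups → numGroups ≤ (tl.length : Int) →
    ∀ g ∈ tl.head?, ∀ e ∈ g, e ∉ prevUsedDominos
instance (groups : List (List Int)) (numGroups : Int) (prevUsedDominos : List Int) : Decidable (Pre_collectionsOfDisjointGroups groups numGroups prevUsedDominos) := by unfold Pre_collectionsOfDisjointGroups; infer_instance

def pvWitness_collectionsOfDisjointGroups : List (List Int) × Int × List Int := ([[1, 2], [3, 4]], 1, [5])

def Spec_collectionsOfDisjointGroups (groups : List (List Int)) (numGroups : Int) (prevUsedDominos : List Int) (out : List (List (List Int))) : Prop := out = collectionsOfDisjointGroups_alt groups numGroups prevUsedDominos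
instance (groups : List (List Int)) (numGroups : Int) (prevUsedDominos : List Int) (out : List (List (List Int))) : Decidable (Spec_collectionsOfDisjointGroups groups numGroups prevUsedDominos out) := by unfold Spec_collectionsOfDisjointGroups; infer_instance

-- ===== CLAIM (what is proved, stated in full; the proofs are below) =====
def Claim_equal_collectionsOfDisjointGroups : Prop := ∀ (groups : List (List Int)) (numGroups : Int) (prevUsedDominos : List Int), Dom_collectionsOfDisjointGroups groups numGroups prevUsedDominos → Pre_collectionsOfDisjointGroups groups numGroups prevUsedDominos → Spec_collectionsOfDisjointGroups groups numGroups prevUsedDominos (collectionsOfDisjointGroups groups numGroups prevUsedDominos)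

-- ===== LEMMAS AND PROOFS =====

-- Proof-side characterisation devices (used only below): all length-k subsequences in
-- lexicographic-by-position order, and the accumulated-disjointness check.
def pySubseqs (lst : List (List Int)) (k : Int) : List (List (List Int)) :=
  if k = 0 then [[]]
  else
    match lst with
    | [] => []
    | first :: rest => (pySubseqs rest (k - 1)).map (fun tail => first :: tail) ++ pySubseqs rest k
termination_by lst.length
decreasing_by
  · simp
  · simp

def pyOkFrom (used : PySem.Set Int) : List (List Int) → Bool
  | [] => true
  | g :: gs =>
      if g.any (fun e => PySem.Set.contains used e) then false
      else pyOkFrom (PySem.Set.union used (PySem.Set.ofList g)) gs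

theorem cdg_empty (n : Nat) : ∀ (groups : List (List Int)), groups.length ≤ n →
    ∀ (k : Int) (prev : List Int), (k < 0 ∨ (groups.length : Int) < k) →
    collectionsOfDisjointGroups groups k prev = [] := by
  induction n with
  | zero =>
      intro groups h k prev hk
      match groups with
      | [] =>
          rw [collectionsOfDisjointGroups.eq_def]
          simp at hk
          simp [show ¬ k = 0 by omega]
      | g :: rest => simp at h
  | succ n ih =>
      intro groups h k prev hk
      match groups with
      | [] =>
          rw [collectionsOfDisjointGroups.eq_def]
          simp at hk
          simp [show ¬ k = 0 by omega]
      | g :: rest =>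
          rw [collectionsOfDisjointGroups.eq_def]
          simp only [List.length_cons] at hk
          rw [if_neg (show ¬ k = 0 by omega)]
          have h1 : rest.length ≤ n := by simpa using h
          have h2 : (rest.filter (disjA (PySem.Set.union prev (PySem.Set.ofList g)))).length ≤ n :=
            le_trans (List.length_filter_le _ _) h1
          have hflt : ((rest.filter (disjA (PySem.Set.union prev (PySem.Set.ofList g)))).length : Int)
              ≤ (rest.length : Int) := by
            exact_mod_cast List.length_filter_le _ _
          show (List.map _ (collectionsOfDisjointGroups (rest.filter (disjA (PySem.Set.union prev (PySem.Set.ofList g)))) (k - 1) (PySem.Set.union prev (PySem.Set.ofList g)))) ++ collectionsOfDisjointGroups rest k prev = []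
          rw [ih _ h2 (k - 1) _ (by omega), ih _ h1 k _ (by push_cast at hk ⊢; omega)]
          simp

theorem pySubseqs_empty : ∀ (lst : List (List Int)) (k : Int),
    (k < 0 ∨ (lst.length : Int) < k) → pySubseqs lst k = [] := by
  intro lst
  induction lst with
  | nil =>
      intro k hk
      rw [pySubseqs]
      simp at hk
      simp [show ¬ k = 0 by omega]
  | cons g rest ih =>
      intro k hk
      rw [pySubseqs]
      simp only [List.length_cons] at hk
      rw [if_neg (show ¬ k = 0 by omega)]
      try dsimp only
      rw [ih (k - 1) (by push_cast at hk ⊢; omega), ih k (by push_cast at hk ⊢; omega)]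
      simp

theorem contains_congr (u v : PySem.Set Int) (h : ∀ x, x ∈ u ↔ x ∈ v) (e : Int) :
    PySem.Set.contains u e = PySem.Set.contains v e := by
  apply Bool.eq_iff_iff.mpr
  rw [PySem.Set.contains_iff, PySem.Set.contains_iff]
  exact h e

theorem disjA_congr (u v : PySem.Set Int) (h : ∀ x, x ∈ u ↔ x ∈ v) (g : List Int) :
    disjA u g = disjA v g := by
  unfold disjA
  rw [funext (fun e => by
    show (!(PySem.Set.contains u e)) = (!(PySem.Set.contains v e))
    rw [contains_congr u v h e] :
    ∀ e, (fun e => !(PySem.Set.contains u e)) e = (fun e => !(PySem.Set.contains v e)) e)]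

theorem okFrom_congr (t : List (List Int)) : ∀ (u v : PySem.Set Int), (∀ x, x ∈ u ↔ x ∈ v) →
    pyOkFrom u t = pyOkFrom v t := by
  induction t with
  | nil => intro u v h; rfl
  | cons g gs ih =>
      intro u v h
      rw [pyOkFrom, pyOkFrom]
      rw [funext (fun e => by
        show PySem.Set.contains u e = PySem.Set.contains v e
        rw [contains_congr u v h e] :
        ∀ e, (fun e => PySem.Set.contains u e) e = (fun e => PySem.Set.contains v e) e)]
      split_ifs with hc
      · rfl
      · exact ih _ _ (fun x => by
          simp only [PySem.Set.mem_union]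
          exact or_congr (h x) Iff.rfl)

theorem disj_absorb (used g x : List Int)
    (h : disjA (PySem.Set.union used (PySem.Set.ofList g)) x = true) :
    disjA used x = true := by
  unfold disjA at h ⊢
  simp at h ⊢
  intro e he
  exact (h e he).1

theorem any_eq_not_all {α : Type} (p : α → Bool) (g : List α) :
    g.any p = !(g.all fun e => !(p e)) := by
  induction g with
  | nil => simp
  | cons a t ih => cases ha : p a <;> simp [ha, ih]

theorem okFrom_cons (used : PySem.Set Int) (g : List Int) (t : List (List Int)) :
    pyOkFrom used (g :: t)
      = if disjA used g then pyOkFrom (PySem.Set.union used (PySem.Set.ofList g)) t else false := by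
  rw [pyOkFrom, any_eq_not_all]
  unfold disjA
  cases hg : g.all (fun e => !(PySem.Set.contains used e)) <;> simp_all

theorem cdg_filter_eq (groups : List (List Int)) : ∀ (k : Int) (used : List Int),
    collectionsOfDisjointGroups (groups.filter (disjA used)) k used
      = (pySubseqs groups k).filter (pyOkFrom used) := by
  induction groups with
  | nil =>
      intro k used
      by_cases hk : k = 0
      · subst hk
        rw [collectionsOfDisjointGroups.eq_def, pySubseqs]
        simp [pyOkFrom]
      · rw [collectionsOfDisjointGroups.eq_def, pySubseqs]
        simp [hk]
  | cons g rest ih =>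
      intro k used
      by_cases hk : k = 0
      · subst hk
        rw [collectionsOfDisjointGroups.eq_def, pySubseqs]
        simp [pyOkFrom]
      · rw [List.filter_cons]
        by_cases hg : disjA used g = true
        · rw [if_pos hg]
          rw [collectionsOfDisjointGroups.eq_def]
          rw [if_neg hk]
          try dsimp only
          have habs : (rest.filter (disjA used)).filter
                (disjA (PySem.Set.union used (PySem.Set.ofList g)))
              = rest.filter (disjA (PySem.Set.union used (PySem.Set.ofList g))) := by
            rw [List.filter_filter]
            refine List.filter_congr ?_
            intro x _
            cases hx : disjA (PySem.Set.union used (PySem.Set.ofList g)) x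
            · simp
            · simp [disj_absorb used g x hx]
          rw [habs, ih (k - 1) (PySem.Set.union used (PySem.Set.ofList g)), ih k used]
          rw [pySubseqs, if_neg hk]
          try dsimp only
          rw [List.filter_append, List.filter_map]
          congr 2
          refine List.filter_congr ?_
          intro t _
          show _ = pyOkFrom used (g :: t)
          rw [okFrom_cons, if_pos hg]
        · rw [if_neg hg, ih k used]
          rw [pySubseqs, if_neg hk]
          try dsimp only
          rw [List.filter_append, List.filter_map]
          have hnil : (pySubseqs rest (k - 1)).filter ((pyOkFrom used) ∘ (fun tail => g :: tail)) = [] := by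
            refine List.filter_eq_nil_iff.mpr ?_
            intro t _
            show ¬ pyOkFrom used (g :: t) = true
            rw [okFrom_cons, if_neg hg]
            simp
          rw [hnil]
          simp

-- A on the raw group list, under Pre_, equals the subsequence-filter characterisation.
theorem cdg_unchanged (groups : List (List Int)) : ∀ (k : Int) (prev : List Int),
    Pre_collectionsOfDisjointGroups groups k prev →
    collectionsOfDisjointGroups groups k prev
      = (pySubseqs groups k).filter (pyOkFrom (PySem.Set.ofList prev)) := by
  induction groups with
  | nil =>
      intro k prev _
      by_cases hk : k = 0
      · subst hk
        rw [collectionsOfDisjointGroups.eq_def, pySubseqs]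
        simp [pyOkFrom]
      · rw [collectionsOfDisjointGroups.eq_def, pySubseqs]
        simp [hk]
  | cons g rest ih =>
      intro k prev hP
      by_cases hk : k = 0
      · subst hk
        rw [collectionsOfDisjointGroups.eq_def, pySubseqs]
        simp [pyOkFrom]
      · by_cases hneg : k < 0
        · rw [cdg_empty (g :: rest).length _ le_rfl k prev (Or.inl hneg),
            pySubseqs_empty _ k (Or.inl hneg)]
          simp
        -- now k ≥ 1
        · have hk1 : 1 ≤ k := by omega
          have hPrest : Pre_collectionsOfDisjointGroups rest k prev := by
            intro tl htl
            exact hP tl (by simp only [List.tails_cons]; exact List.mem_cons_of_mem _ htl)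
          by_cases hg : disjA prev g = true
          · rw [collectionsOfDisjointGroups.eq_def, if_neg hk]
            try dsimp only
            rw [pySubseqs, if_neg hk]
            try dsimp only
            rw [List.filter_append, List.filter_map, ih k prev hPrest]
            congr 1
            rw [cdg_filter_eq rest (k - 1) (PySem.Set.union prev (PySem.Set.ofList g))]
            congr 1
            refine List.filter_congr ?_
            intro t _
            show pyOkFrom (PySem.Set.union prev (PySem.Set.ofList g)) t
                = pyOkFrom (PySem.Set.ofList prev) (g :: t)
            rw [okFrom_cons]
            have hg' : disjA (PySem.Set.ofList prev) g = true := by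
              rw [disjA_congr _ prev (fun x => PySem.Set.mem_ofList prev x)]
              exact hg
            rw [if_pos hg']
            exact okFrom_congr t _ _ (fun x => by
              simp only [PySem.Set.mem_union, PySem.Set.mem_ofList])
          -- g intersects prev; Pre_ then forces k > length, so both sides are empty
          · have hint : ∃ e ∈ g, e ∈ prev := by
              unfold disjA at hg
              simp only [List.all_eq_true, Bool.not_eq_true'] at hg
              push Not at hg
              obtain ⟨e, he, hce⟩ := hg
              exact ⟨e, he, (PySem.Set.contains_iff _ _).mp (by simpa using hce)⟩
            have hlen : ((g :: rest).length : Int) < k := by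
              by_contra hle
              obtain ⟨e, he, hep⟩ := hint
              exact hP (g :: rest) (by simp) hk1 (by omega) g rfl e he hep
            rw [cdg_empty (g :: rest).length _ le_rfl k prev (Or.inr hlen),
              pySubseqs_empty _ k (Or.inr hlen)]
            simp

-- KEY for B: extend(start, used, k) equals A run on the used-compatible part of groups[start:].
theorem ext_eq (groups : List (List Int)) (n : Nat) : ∀ (fuel : Nat) (s : Int), 0 ≤ s →
    (((groups.length : Int) - s).toNat ≤ n) → (((groups.length : Int) - s).toNat < fuel) →
    ∀ (used : List Int) (k : Int),
    pyExtend groups fuel s used k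
      = collectionsOfDisjointGroups ((groups.drop s.toNat).filter (disjA used)) k used := by
  induction n with
  | zero =>
      intro fuel s hs hn _ used k
      have hge : (groups.length : Int) ≤ s := by omega
      rw [pyExtend.eq_def]
      by_cases hk : k = 0
      · subst hk
        have : (groups.drop s.toNat).filter (disjA used) = [] := by
          rw [List.drop_eq_nil_of_le (by omega)]
          rfl
        rw [this, collectionsOfDisjointGroups.eq_def]
        simp
      · rw [if_neg hk]
        have hnil : PySem.List.pyRange s (groups.length : Int) 1 = [] :=
          PySem.List.pyRange_one_eq_nil hge
        have hdrop : (groups.drop s.toNat).filter (disjA used) = [] := by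
          rw [List.drop_eq_nil_of_le (by omega)]
          rfl
        rw [hdrop, collectionsOfDisjointGroups.eq_def]
        rw [if_neg hk]
        match fuel with
        | 0 => rfl
        | fuel' + 1 => rw [hnil]; rfl
  | succ n ih =>
      intro fuel s hs hn hfuel used k
      rw [pyExtend.eq_def]
      by_cases hk : k = 0
      · subst hk
        rw [collectionsOfDisjointGroups.eq_def]
        simp
      · rw [if_neg hk]
        match fuel, hfuel with
        | fuel' + 1, hfuel =>
        try dsimp only
        by_cases hlt : s < (groups.length : Int)
        · have hsn : s.toNat < groups.length := by omega
          have hget : PySem.List.pyGetD groups s [] = groups[s.toNat] := by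
            have h1 : PySem.List.pyGetD groups ((s.toNat : Nat) : Int) [] = groups[s.toNat] := by
              rw [PySem.List.pyGetD_natCast]
              exact List.getD_eq_getElem _ _ hsn
            exact (congrArg (fun i => PySem.List.pyGetD groups i []) (Int.toNat_of_nonneg hs).symm).trans h1
          have hdrop : groups.drop s.toNat = groups[s.toNat] :: groups.drop (s.toNat + 1) :=
            List.drop_eq_getElem_cons hsn
          rw [PySem.List.pyRange_one_cons hlt, List.flatMap_cons, hdrop, List.filter_cons]
          have hrest : (PySem.List.pyRange (s + 1) (groups.length : Int) 1).flatMap (fun i =>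
              if (PySem.List.pyGetD groups i []).any (fun e => PySem.Set.contains used e) then []
              else
                (pyExtend groups fuel' (i + 1)
                    (PySem.Set.union used (PySem.Set.ofList (PySem.List.pyGetD groups i []))) (k - 1)).map
                  (fun tail => PySem.List.pyGetD groups i [] :: tail))
              = pyExtend groups (fuel' + 1) (s + 1) used k := by
            rw [pyExtend.eq_def, if_neg hk]

          have hs1 : (s + 1).toNat = s.toNat + 1 := by omega
          have hrec := ih (fuel' + 1) (s + 1) (by omega) (by omega) (by omega) used k
          rw [hs1] at hrec
          have hguard : ((PySem.List.pyGetD groups s []).any (fun e => PySem.Set.contains used e))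
              = !(disjA used groups[s.toNat]) := by
            rw [hget, any_eq_not_all]
            rfl
          by_cases hd : disjA used groups[s.toNat] = true
          · rw [if_neg (by rw [hguard, hd]; simp), if_pos hd]
            have hfst := ih fuel' (s + 1) (by omega) (by omega) (by omega)
              (PySem.Set.union used (PySem.Set.ofList groups[s.toNat])) (k - 1)
            rw [hs1] at hfst
            rw [hget, hfst, hrest, hrec]
            rw [collectionsOfDisjointGroups.eq_def (groups[s.toNat] :: _)]
            rw [if_neg hk]
            try dsimp only
            congr 2
            rw [List.filter_filter]
            have hff : (List.drop (s.toNat + 1) groups).filter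
                (fun a => disjA (PySem.Set.union used (PySem.Set.ofList groups[s.toNat])) a && disjA used a)
                = (List.drop (s.toNat + 1) groups).filter
                    (disjA (PySem.Set.union used (PySem.Set.ofList groups[s.toNat]))) := by
              refine List.filter_congr ?_
              intro x _
              cases hx : disjA (PySem.Set.union used (PySem.Set.ofList groups[s.toNat])) x
              · simp
              · simp [disj_absorb used groups[s.toNat] x hx]
            rw [hff]
          · rw [if_pos (by rw [hguard]; simp [hd]), if_neg hd]
            rw [List.nil_append, hrest, hrec]
        · have hge : (groups.length : Int) ≤ s := by omega
          have hnil : PySem.List.pyRange s (groups.length : Int) 1 = [] :=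
            PySem.List.pyRange_one_eq_nil hge
          have hdrop : (groups.drop s.toNat).filter (disjA used) = [] := by
            rw [List.drop_eq_nil_of_le (by omega)]
            rfl
          rw [hnil, hdrop, collectionsOfDisjointGroups.eq_def, if_neg hk]
          rfl

-- ===== VERDICT (by name: the statement is the Claim_ definition above) =====
theorem collectionsOfDisjointGroups_spec : Claim_equal_collectionsOfDisjointGroups := by
  intro groups numGroups prevUsedDominos _ hP
  unfold Spec_collectionsOfDisjointGroups collectionsOfDisjointGroups_alt
  rw [ext_eq groups groups.length (groups.length + 1) 0 le_rfl (by omega) (by omega)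
    (PySem.Set.ofList prevUsedDominos) numGroups]
  rw [Int.toNat_zero, List.drop_zero]
  rw [cdg_filter_eq groups numGroups (PySem.Set.ofList prevUsedDominos)]
  exact cdg_unchanged groups numGroups prevUsedDominos hP
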